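-- pv_equiv track=rewrite | github.com/OstapMaksymiv/Programming-Languages-and-Paradigms | lab1/zad_3.py | sortowanie
-- ===== SOURCE A (Python) =====
-- def sortowanie(zadania):
--     zadania.sort(key=lambda x: x[0])
--     allTime = 0
--     actualTime = 0
--
--     for czas, nagroda in zadania:
--         actualTime += czas
--         allTime += actualTime
--
--     return zadania, allTime
-- ===== SOURCE B (Python) =====
-- def sortowanie(zadania):
--     zadania.sort(key=lambda x: x[0])
--     n = len(zadania)
--     allTime = sum(czas * (n - i) for i, (czas, nagroda) in enumerate(zadania))
--     return zadania, allTime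
-- ===== Notes on version B (the rewrite author's own statement) =====
-- stated objective: alternative
-- what changed: Replaces the running-accumulator loop (actualTime/allTime) by a closed-form weighted sum: each sorted element at index i contributes czas*(n-i), computed with enumerate in a single generator-sum.
import Mathlib
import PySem

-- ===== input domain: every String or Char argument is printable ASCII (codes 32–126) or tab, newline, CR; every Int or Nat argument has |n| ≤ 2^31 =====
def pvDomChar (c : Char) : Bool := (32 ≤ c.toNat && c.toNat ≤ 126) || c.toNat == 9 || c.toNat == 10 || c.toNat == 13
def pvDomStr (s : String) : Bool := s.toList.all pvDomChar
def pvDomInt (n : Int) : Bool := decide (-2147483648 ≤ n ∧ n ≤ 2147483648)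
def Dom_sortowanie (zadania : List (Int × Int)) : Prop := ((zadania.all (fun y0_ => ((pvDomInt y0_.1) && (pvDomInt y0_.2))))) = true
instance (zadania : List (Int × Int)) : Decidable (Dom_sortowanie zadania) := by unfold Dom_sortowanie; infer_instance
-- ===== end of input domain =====

-- B replaces A's running-accumulator loop by the closed-form weighted sum czas*(n-i) over the
-- sorted list (same value, same cost). A sorts its argument in place; equivalence here concerns
-- the RETURN value (B performs the same in-place sort).

-- ===== PORT A =====
def sortowanie (zadania : List (Int × Int)) : (List (Int × Int)) × Int :=
  let zs := PySem.List.sorted zadania (fun x => x.1) false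
  -- allTime = 0; actualTime = 0; for czas, nagroda in zadania: actualTime += czas; allTime += actualTime
  let st := zs.foldl (fun (st : Int × Int) p =>
    let actualTime := st.2 + p.1
    (st.1 + actualTime, actualTime)) (0, 0)
  (zs, st.1)

-- ===== PORT B =====
def sortowanie_alt (zadania : List (Int × Int)) : (List (Int × Int)) × Int :=
  let zs := PySem.List.sorted zadania (fun x => x.1) false
  let n : Int := zs.length
  let allTime : Int := ((PySem.List.enumerate zs).map (fun p => p.2.1 * (n - p.1))).sum
  (zs, allTime)

-- ===== PRECONDITION & SPEC =====
def Spec_sortowanie (zadania : List (Int × Int)) (out : (List (Int × Int)) × Int) : Prop := out = sortowanie_alt zadania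
instance (zadania : List (Int × Int)) (out : (List (Int × Int)) × Int) : Decidable (Spec_sortowanie zadania out) := by unfold Spec_sortowanie; infer_instance

-- ===== CLAIM (what is proved, stated in full; the proofs are below) =====
def Claim_equal_sortowanie : Prop := ∀ (zadania : List (Int × Int)), Dom_sortowanie zadania → Spec_sortowanie zadania (sortowanie zadania)

-- ===== LEMMAS AND PROOFS =====

-- Loop invariant: A's accumulator pair vs B's weighted sum, generalized over the
-- enumerate start s and the initial state (a, t).
theorem sortowanie_fold_eq (l : List (Int × Int)) :
    ∀ (a t s : Int),
      (l.foldl (fun (st : Int × Int) p =>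
        let actualTime := st.2 + p.1
        (st.1 + actualTime, actualTime)) (a, t)).1
      = a + t * l.length +
        ((PySem.List.enumerate l s).map (fun p => p.2.1 * ((s + l.length) - p.1))).sum := by
  induction l with
  | nil => intro a t s; simp [PySem.List.enumerate_nil]
  | cons x xs ih =>
    intro a t s
    simp only [List.foldl_cons, PySem.List.enumerate_cons, List.map_cons, List.sum_cons,
      List.length_cons]
    rw [ih (a + (t + x.1)) (t + x.1) (s + 1)]
    have hfun : (fun p : Int × (Int × Int) => p.2.1 * (s + 1 + (xs.length : Int) - p.1))
        = fun p : Int × (Int × Int) => p.2.1 * (s + ((xs.length : Int) + 1) - p.1) := by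
      funext p; ring
    push_cast
    rw [hfun]
    ring

-- ===== VERDICT (by name: the statement is the Claim_ definition above) =====
theorem sortowanie_spec : Claim_equal_sortowanie := by
  intro zadania _
  unfold Spec_sortowanie sortowanie sortowanie_alt
  simp only
  rw [sortowanie_fold_eq _ 0 0 0]
  simp
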